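-- pv_equiv track=rewrite | github.com/ruanwensheng/serperior | backend/serperior/api/analyzer.py | _analyze_keyword_timeline
-- ===== SOURCE A (Python) =====
-- from typing import List, Dict, Tuple, Optional
--
-- def _analyze_keyword_timeline(articles: List[Dict],
--                                top_keywords: List[Tuple[str, int]]) -> Dict:
--     """Phân tích keywords theo timeline"""
--     top_5_words = [word for word, _ in top_keywords[:5]]
--
--     # Group by date
--     by_date = {}
--     for article in articles:
--         date = article.get('date')
--         if not date:
--             continue
--
--         if date not in by_date:
--             by_date[date] = []
--         by_date[date].append(article)
--
--     # Count keywords per date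
--     timeline = {}
--     for date, day_articles in sorted(by_date.items()):
--         day_text = " ".join([
--             f"{a.get('title', '')} {a.get('body', '')}"
--             for a in day_articles
--         ]).lower()
--
--         timeline[date] = {
--             word: day_text.count(word)
--             for word in top_5_words
--         }
--
--     return timeline
-- ===== SOURCE B (Python) =====
-- def _analyze_keyword_timeline(articles, top_keywords):
--     """Keyword timeline: sorted set of distinct dates + a per-date scan (no grouping dict)."""
--     top_5_words = [word for word, _ in top_keywords[:5]]
--     dated = [a for a in articles if a.get('date')]
--
--     def day_counts(d):
--         day_text = " ".join(
--             f"{a.get('title', '')} {a.get('body', '')}"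
--             for a in dated if a['date'] == d
--         ).lower()
--         return {word: day_text.count(word) for word in top_5_words}
--
--     return {d: day_counts(d) for d in sorted({a['date'] for a in dated})}
-- ===== Notes on version B (the rewrite author's own statement) =====
-- stated objective: alternative
-- what changed: B drops A's hash-grouping dict entirely: it filters the dated articles once, then builds the result directly as a comprehension over the sorted set of distinct dates, re-scanning the dated articles per date.
import Mathlib
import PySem

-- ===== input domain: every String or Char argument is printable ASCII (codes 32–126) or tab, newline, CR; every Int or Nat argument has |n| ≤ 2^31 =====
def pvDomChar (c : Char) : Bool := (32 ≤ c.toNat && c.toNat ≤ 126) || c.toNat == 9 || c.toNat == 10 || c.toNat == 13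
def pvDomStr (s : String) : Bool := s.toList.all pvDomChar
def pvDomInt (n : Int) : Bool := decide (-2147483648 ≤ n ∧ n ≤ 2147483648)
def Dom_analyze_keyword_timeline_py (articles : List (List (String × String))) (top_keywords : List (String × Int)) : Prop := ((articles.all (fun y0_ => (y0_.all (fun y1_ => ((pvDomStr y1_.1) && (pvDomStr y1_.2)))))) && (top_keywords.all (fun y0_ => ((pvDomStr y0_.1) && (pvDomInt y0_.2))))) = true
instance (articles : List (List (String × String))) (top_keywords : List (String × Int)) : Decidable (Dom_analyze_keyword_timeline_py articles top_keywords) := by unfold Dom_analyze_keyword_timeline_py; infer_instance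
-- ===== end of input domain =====

-- ===== PORT A =====
-- B changes the decomposition: sorted set of distinct dates + per-date scan, no grouping dict.
-- Shared accessor helpers (dict.get of an article, Python: first-match lookup in the assoc list).
def pvGetOpt (a : List (String × String)) (k : String) : Option String :=
  (a.find? (fun p => p.1 == k)).map (fun p => p.2)

def pvGetDflt (a : List (String × String)) (k : String) : String :=
  (pvGetOpt a k).getD ""

-- " ".join(f"{a.get('title','')} {a.get('body','')}" for a in day_articles).lower()
def pvDayText (day_articles : List (List (String × String))) : String :=
  PySem.Str.lower (PySem.Str.join " "
    (day_articles.map (fun a => PySem.Str.join " " [pvGetDflt a "title", pvGetDflt a "body"])))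

-- {word: day_text.count(word) for word in top_5_words}
def pvRow (top_5_words : List String) (day_text : String) : List (String × Int) :=
  top_5_words.map (fun w => (w, (PySem.Str.count day_text w : Int)))

def analyze_keyword_timeline_py (articles : List (List (String × String))) (top_keywords : List (String × Int)) : List (String × List (String × Int)) :=
  let top_5_words := (PySem.List.slice top_keywords none (some 5)).map (fun p => p.1)
  -- group by date (skip falsy date = missing or "")
  let by_date : PySem.Dict String (List (List (String × String))) :=
    articles.foldl (fun d article =>
      match pvGetOpt article "date" with
      | none => d
      | some date =>
        if date == "" then d
        else
          let d := if d.contains date then d else d.insert date []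
          d.modify date [] (fun xs => xs ++ [article])) PySem.Dict.empty
  -- sorted(by_date.items()): dict keys are distinct, so Python's tuple comparison is decided by the key
  let sorted_items := PySem.List.sorted by_date.items (fun p => p.1)
  (sorted_items.foldl (fun tl p =>
      tl.insert p.1 (pvRow top_5_words (pvDayText p.2))) PySem.Dict.empty).items

-- ===== PORT B =====
-- a.get('date') is truthy (present and non-empty)
def pvDateTruthy (a : List (String × String)) : Bool :=
  match pvGetOpt a "date" with
  | some s => !(s == "")
  | none => false

def analyze_keyword_timeline_py_alt (articles : List (List (String × String))) (top_keywords : List (String × Int)) : List (String × List (String × Int)) :=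
  let top_5_words := (PySem.List.slice top_keywords none (some 5)).map (fun p => p.1)
  let dated := articles.filter pvDateTruthy
  -- sorted({a['date'] for a in dated}); 'date' is present on every element of dated, so a['date'] = pvGetDflt a "date"
  let dates := PySem.List.sorted (PySem.Set.ofList (dated.map (fun a => pvGetDflt a "date"))) (fun d => d)
  dates.map (fun d =>
    (d, pvRow top_5_words (pvDayText (dated.filter (fun a => pvGetDflt a "date" == d)))))

-- ===== PRECONDITION & SPEC =====
def Spec_analyze_keyword_timeline_py (articles : List (List (String × String))) (top_keywords : List (String × Int)) (out : List (String × List (String × Int))) : Prop := out = analyze_keyword_timeline_py_alt articles top_keywords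
instance (articles : List (List (String × String))) (top_keywords : List (String × Int)) (out : List (String × List (String × Int))) : Decidable (Spec_analyze_keyword_timeline_py articles top_keywords out) := by unfold Spec_analyze_keyword_timeline_py; infer_instance

-- ===== CLAIM (what is proved, stated in full; the proofs are below) =====
def Claim_equal_analyze_keyword_timeline_py : Prop := ∀ (articles : List (List (String × String))) (top_keywords : List (String × Int)), Dom_analyze_keyword_timeline_py articles top_keywords → Spec_analyze_keyword_timeline_py articles top_keywords (analyze_keyword_timeline_py articles top_keywords)


-- ===== LEMMAS AND PROOFS =====

-- abbreviations for the proofs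
def pvDKey (a : List (String × String)) : String := pvGetDflt a "date"

def pvGrp (dated : List (List (String × String))) (d : String) : List (List (String × String)) :=
  dated.filter (fun a => pvDKey a == d)

-- the setdefault-then-append pattern of A's grouping loop is a single modify
theorem modify_setdefault {nu : Type} (d : PySem.Dict String (List nu)) (k : String) (f : List nu → List nu) :
    (if d.contains k then d else d.insert k []).modify k [] f = d.modify k [] f := by
  by_cases h : d.contains k = true
  · simp [h]
  · simp only [Bool.not_eq_true] at h
    simp [h, PySem.Dict.modify, PySem.Dict.getD_insert_self,
      PySem.Dict.insert_insert_self, PySem.Dict.getD_of_not_contains d [] h]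

-- A's grouping-loop body, rewritten through the truthiness test
theorem body_eq (d : PySem.Dict String (List (List (String × String)))) (article : List (String × String)) :
    (match pvGetOpt article "date" with
      | none => d
      | some date =>
        if date == "" then d
        else
          (if d.contains date then d else d.insert date []).modify date [] (fun xs => xs ++ [article])) =
    (if pvDateTruthy article then d.modify (pvDKey article) [] (fun xs => xs ++ [article]) else d) := by
  unfold pvDateTruthy pvDKey pvGetDflt
  cases h : pvGetOpt article "date" with
  | none => simp
  | some s =>
    by_cases hs : s = ""
    · simp [hs]
    · simp [hs, modify_setdefault]

-- A's grouping dict is the modify-fold over the dated articles, keyed by date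
theorem byDate_eq (articles : List (List (String × String))) :
    (articles.foldl (fun d article =>
      match pvGetOpt article "date" with
      | none => d
      | some date =>
        if date == "" then d
        else
          (if d.contains date then d else d.insert date []).modify date [] (fun xs => xs ++ [article]))
      PySem.Dict.empty) =
    ((articles.filter pvDateTruthy).map (fun a => (pvDKey a, a))).foldl
      (fun d p => d.modify p.1 [] (fun xs => xs ++ [p.2])) PySem.Dict.empty := by
  rw [List.foldl_map, List.foldl_filter]
  congr 1
  funext d a
  exact body_eq d a

theorem items_byDate (dated : List (List (String × String))) :
    ((dated.map (fun a => (pvDKey a, a))).foldl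
      (fun d p => d.modify p.1 [] (fun xs => xs ++ [p.2])) PySem.Dict.empty).items =
    (PySem.Set.ofList (dated.map pvDKey)).map (fun k => (k, pvGrp dated k)) := by
  have hnd : ((dated.map (fun a => (pvDKey a, a))).foldl
      (fun d p => d.modify p.1 [] (fun xs => xs ++ [p.2])) PySem.Dict.empty).keys.Nodup :=
    PySem.Dict.nodup_keys_foldl_modify_key _ Prod.fst [] (fun _ p xs => xs ++ [p.2]) _
      (by simp [PySem.Dict.keys_empty])
  rw [PySem.Dict.items_eq_map_keys _ hnd []]
  rw [PySem.Dict.keys_foldl_modify_key _ Prod.fst [] (fun _ p xs => xs ++ [p.2])]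
  simp only [PySem.Dict.keys_empty, PySem.Set.update_nil_left, List.map_map]
  apply List.map_congr_left
  intro k _
  rw [PySem.Dict.getD_foldl_modify_append]
  rw [PySem.Dict.getD_of_not_contains _ _ rfl]
  simp only [List.nil_append, pvGrp]
  simp [List.filter_map, Function.comp_def]

theorem sorted_items_byDate (dated : List (List (String × String))) :
    PySem.List.sorted
      (((dated.map (fun a => (pvDKey a, a))).foldl
        (fun d p => d.modify p.1 [] (fun xs => xs ++ [p.2])) PySem.Dict.empty).items)
      (fun p => p.1) =
    (PySem.List.sorted (PySem.Set.ofList (dated.map pvDKey)) (fun d => d)).map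
      (fun d => (d, pvGrp dated d)) := by
  rw [items_byDate]
  apply PySem.List.sorted_eq_of_perm_of_pairwise_lt
  · exact (PySem.List.sorted_perm _ _ false).map _
  · rw [List.pairwise_map]
    have hle := PySem.List.sorted_pairwise (PySem.Set.ofList (dated.map pvDKey)) (fun d => d)
    have hnd : (PySem.List.sorted (PySem.Set.ofList (dated.map pvDKey)) (fun d => d)).Nodup :=
      ((PySem.List.sorted_perm _ _ false).nodup_iff).mpr (PySem.Set.nodup_ofList _)
    exact (hnd.and hle).imp (fun h => lt_of_le_of_ne h.2 h.1)

theorem main_eq (articles : List (List (String × String))) (top_keywords : List (String × Int)) :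
    analyze_keyword_timeline_py articles top_keywords = analyze_keyword_timeline_py_alt articles top_keywords := by
  have hfresh : ∀ d ∈ PySem.List.sorted (PySem.Set.ofList ((articles.filter pvDateTruthy).map pvDKey)) (fun d => d),
      (PySem.Dict.empty : PySem.Dict String (List (String × Int))).contains d = false := fun _ _ => rfl
  have hnd : ((PySem.List.sorted (PySem.Set.ofList ((articles.filter pvDateTruthy).map pvDKey)) (fun d => d)).map (fun d => d)).Nodup := by
    simpa using ((PySem.List.sorted_perm (PySem.Set.ofList ((articles.filter pvDateTruthy).map pvDKey)) (fun d => d) false).nodup_iff).mpr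
      (PySem.Set.nodup_ofList ((articles.filter pvDateTruthy).map pvDKey))
  unfold analyze_keyword_timeline_py analyze_keyword_timeline_py_alt
  dsimp only
  rw [byDate_eq, sorted_items_byDate, List.foldl_map]
  rw [PySem.Dict.items_foldl_insert_fresh _ (fun d => d) _ PySem.Dict.empty hfresh hnd]
  simp [pvGrp, pvDKey]
  rfl

-- ===== VERDICT (by name: the statement is the Claim_ definition above) =====
theorem analyze_keyword_timeline_py_spec : Claim_equal_analyze_keyword_timeline_py := by
  intro articles top_keywords _
  exact main_eq articles top_keywords
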